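-- pv_equiv track=rewrite | github.com/FrewtyPebbles/DeadPad-CLI-Text-Editor | parts/document.py | chunk_str_by_weight
-- ===== SOURCE A (Python) =====
-- def chrweight(char:str):
--     match char:
--         case "\t":
--             return 3
--         case None: # equivalent of space in textscreen
--             return 1
--         case _:
--             return 1
--
-- def str_weight(string:str):
--     weight = 0
--     for char in string:
--         weight += chrweight(char)
--     return weight
--
-- def chunk_str_by_weight(string:str, chunk_size:int):
--     chunks:list[str] = []
--     str_buff = ""
--     chr_ind = 0
--     while chr_ind < len(string):
--         str_buff = ""
--         while (str_weight(str_buff) + chrweight(string[chr_ind])) < chunk_size \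
--         if chr_ind < len(string) else False:
--             str_buff += string[chr_ind]
--             chr_ind += 1
--         chunks.append(str_buff)
--
--     return chunks
-- ===== SOURCE B (Python) =====
-- def chunk_str_by_weight(string, chunk_size):
--     chunks = []
--     buff = ""
--     weight = 0
--     for char in string:
--         cw = 3 if char == "\t" else 1
--         if chunk_size <= weight + cw:
--             chunks.append(buff)
--             buff = ""
--             weight = 0
--         buff += char
--         weight += cw
--     if buff:
--         chunks.append(buff)
--     return chunks
-- ===== Notes on version B (the rewrite author's own statement) =====
-- stated objective: faster
-- what changed: Replaced the nested while loops that recompute str_weight of the growing buffer on every character (quadratic) with a single pass that maintains the running weight incrementally and flushes the buffer when the next character would reach chunk_size.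
import Mathlib
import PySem

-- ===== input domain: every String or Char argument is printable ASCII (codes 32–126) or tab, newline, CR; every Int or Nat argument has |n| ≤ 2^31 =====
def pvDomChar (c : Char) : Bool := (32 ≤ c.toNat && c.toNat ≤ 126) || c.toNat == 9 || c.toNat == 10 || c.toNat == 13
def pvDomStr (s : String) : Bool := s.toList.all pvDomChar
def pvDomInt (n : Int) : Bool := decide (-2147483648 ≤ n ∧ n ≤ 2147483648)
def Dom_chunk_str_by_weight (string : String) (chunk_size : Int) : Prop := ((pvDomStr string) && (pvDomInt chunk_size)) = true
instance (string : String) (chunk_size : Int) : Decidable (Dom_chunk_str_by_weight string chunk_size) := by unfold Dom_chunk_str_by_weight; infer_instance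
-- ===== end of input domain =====

-- B replaces A's nested while loops (which recompute str_weight of the buffer on every
-- append) with one pass keeping a running weight; measured asymptotically faster.


-- ===== PORT A =====
-- chrweight: the "None" case of A's match cannot arise for a character of a string; it
-- returns 1 like the default case, so the port is the two-way branch.
def chrweightA (c : Char) : Int := if c = '\t' then 3 else 1

def str_weightA (s : List Char) : Int := s.foldl (fun w c => w + chrweightA c) 0

-- inner while loop of A: grows str_buff, advancing chr_ind, while the recomputed
-- str_weight of the buffer plus the next char's weight stays below chunk_size
def innerA (s : List Char) (cs : Int) (buff : List Char) (i : Nat) : List Char × Nat :=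
  if h : i < s.length then
    if str_weightA buff + chrweightA s[i] < cs then
      innerA s cs (buff ++ [s[i]]) (i + 1)
    else (buff, i)
  else (buff, i)
termination_by s.length - i
decreasing_by omega

-- outer while loop of A; fuel only bounds the iteration count (under Pre_ each outer
-- iteration consumes at least one character, so fuel = length + 1 is never exhausted)
def outerA (s : List Char) (cs : Int) : Nat → Nat → List (List Char) → List (List Char)
  | 0, _, chunks => chunks
  | fuel + 1, i, chunks =>
    if i < s.length then
      let p := innerA s cs [] i
      outerA s cs fuel p.2 (chunks ++ [p.1])
    else chunks

def chunk_str_by_weight (string : String) (chunk_size : Int) : List String :=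
  (outerA string.toList chunk_size (string.toList.length + 1) 0 []).map String.ofList

-- ===== PORT B =====
-- one step of B's single for loop; state = (chunks, buff, running weight)
def stepB (cs : Int) (st : List (List Char) × List Char × Int) (c : Char) :
    List (List Char) × List Char × Int :=
  let cw : Int := if c = '\t' then 3 else 1
  if cs ≤ st.2.2 + cw then (st.1 ++ [st.2.1], [c], cw)
  else (st.1, st.2.1 ++ [c], st.2.2 + cw)

-- final "if buff: chunks.append(buff)" of B
def finishB (st : List (List Char) × List Char × Int) : List (List Char) :=
  if st.2.1 = [] then st.1 else st.1 ++ [st.2.1]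

def chunk_str_by_weight_alt (string : String) (chunk_size : Int) : List String :=
  (finishB (string.toList.foldl (stepB chunk_size) ([], [], 0))).map String.ofList

-- ===== PRECONDITION & SPEC =====
-- Pre_ excludes exactly the inputs on which Python A never returns: if some character of
-- the string weighs at least chunk_size, A's outer loop appends "" forever (diverges).
def Pre_chunk_str_by_weight (string : String) (chunk_size : Int) : Prop :=
  (string.toList.all (fun c => decide ((if c = '\t' then (3 : Int) else 1) < chunk_size))) = true

instance (string : String) (chunk_size : Int) : Decidable (Pre_chunk_str_by_weight string chunk_size) := by unfold Pre_chunk_str_by_weight; infer_instance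

def pvWitness_chunk_str_by_weight : String × Int := ("ab", 2)

def Spec_chunk_str_by_weight (string : String) (chunk_size : Int) (out : List String) : Prop := out = chunk_str_by_weight_alt string chunk_size
instance (string : String) (chunk_size : Int) (out : List String) : Decidable (Spec_chunk_str_by_weight string chunk_size out) := by unfold Spec_chunk_str_by_weight; infer_instance

-- ===== CLAIM (what is proved, stated in full; the proofs are below) =====
def Claim_equal_chunk_str_by_weight : Prop := ∀ (string : String) (chunk_size : Int), Dom_chunk_str_by_weight string chunk_size → Pre_chunk_str_by_weight string chunk_size → Spec_chunk_str_by_weight string chunk_size (chunk_str_by_weight string chunk_size)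

-- ===== LEMMAS AND PROOFS =====

-- common reference function: chunks produced when the current partial chunk is `buff`
-- of weight `w` and `l` characters remain
def cont (cs : Int) : Int → List Char → List Char → List (List Char)
  | _w, buff, [] => if buff = [] then [] else [buff]
  | w, buff, c :: rest =>
    if cs ≤ w + chrweightA c then buff :: cont cs (chrweightA c) [c] rest
    else cont cs (w + chrweightA c) (buff ++ [c]) rest

theorem str_weightA_append (buff : List Char) (c : Char) :
    str_weightA (buff ++ [c]) = str_weightA buff + chrweightA c := by
  simp [str_weightA]

theorem innerA_snd_le (s : List Char) (cs : Int) (buff : List Char) (i : Nat) :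
    i ≤ (innerA s cs buff i).2 ∧ (innerA s cs buff i).2 ≤ max i s.length := by
  unfold innerA
  split
  · split
    · have := innerA_snd_le s cs (buff ++ [s[i]]) (i + 1)
      constructor <;> omega
    · simp
  · simp
termination_by s.length - i
decreasing_by omega

theorem innerA_fst_len (s : List Char) (cs : Int) (buff : List Char) (i : Nat) :
    (innerA s cs buff i).1.length = buff.length + ((innerA s cs buff i).2 - i) := by
  unfold innerA
  split
  · split
    · have h2 := innerA_snd_le s cs (buff ++ [s[i]]) (i + 1)
      have := innerA_fst_len s cs (buff ++ [s[i]]) (i + 1)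
      simp at this ⊢
      omega
    · simp
  · simp
termination_by s.length - i
decreasing_by omega

-- the inner loop computes `cont` up to the point where a flush (or the end) happens
theorem innerA_cont (s : List Char) (cs : Int)
    (hpre : ∀ c ∈ s, chrweightA c < cs) (buff : List Char) (i : Nat) (hi : i ≤ s.length) :
    cont cs (str_weightA buff) buff (s.drop i)
      = (if (innerA s cs buff i).2 < s.length
          then (innerA s cs buff i).1 :: cont cs 0 [] (s.drop (innerA s cs buff i).2)
          else if (innerA s cs buff i).1 = [] then [] else [(innerA s cs buff i).1]) := by
  unfold innerA
  split
  · rename_i h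
    rw [List.drop_eq_getElem_cons h]
    split
    · rename_i hlt
      rw [cont]
      rw [if_neg (by omega)]
      rw [← str_weightA_append]
      exact innerA_cont s cs hpre (buff ++ [s[i]]) (i + 1) (by omega)
    · rename_i hge
      rw [cont, if_pos (by omega)]
      congr 1
      -- cont cs 0 [] (s.drop i) with s.drop i = s[i] :: drop (i+1)
      rw [List.drop_eq_getElem_cons h, cont]
      have hc : chrweightA s[i] < cs := hpre _ (List.getElem_mem h)
      rw [if_neg (by omega)]
      simp
  · rename_i h
    have : i = s.length := by omega
    subst this
    simp [cont]
termination_by s.length - i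
decreasing_by omega

-- the outer loop produces `cont` from an empty buffer
theorem outerA_cont (s : List Char) (cs : Int)
    (hpre : ∀ c ∈ s, chrweightA c < cs) :
    ∀ (fuel i : Nat) (chunks : List (List Char)), i ≤ s.length → s.length - i < fuel →
    outerA s cs fuel i chunks = chunks ++ cont cs 0 [] (s.drop i) := by
  intro fuel
  induction fuel with
  | zero => intro i chunks h1 h2; omega
  | succ f ih =>
    intro i chunks hi hfuel
    rw [outerA]
    split
    · rename_i h
      have hinner := innerA_cont s cs hpre [] i (le_of_lt h)
      have hle := innerA_snd_le s cs [] i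
      have hlen := innerA_fst_len s cs [] i
      -- progress: the first character is taken since its weight < cs
      have hprog : i < (innerA s cs [] i).2 := by
        rw [innerA, dif_pos h]
        have hc : chrweightA s[i] < cs := hpre _ (List.getElem_mem h)
        rw [if_pos (by simp [str_weightA]; omega)]
        have := innerA_snd_le s cs ([] ++ [s[i]]) (i + 1)
        omega
      have hbuffW : str_weightA ([] : List Char) = 0 := by simp [str_weightA]
      rw [hbuffW] at hinner
      by_cases h2 : (innerA s cs [] i).2 < s.length
      · rw [if_pos h2] at hinner
        rw [ih _ _ (by omega) (by omega)]
        rw [hinner]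
        simp
      · rw [if_neg h2] at hinner
        have hend : (innerA s cs [] i).2 = s.length := by omega
        have hne : (innerA s cs [] i).1 ≠ [] := by
          intro hc
          rw [hc] at hlen
          simp at hlen
          omega
        rw [if_neg hne] at hinner
        rw [ih _ _ (by omega) (by omega)]
        rw [hend, List.drop_length, hinner]
        simp [cont]
    · rename_i h
      have : i = s.length := by omega
      subst this
      simp [cont]

-- B's fold computes `cont` directly
theorem foldl_stepB_cont (cs : Int) (l : List Char) :
    ∀ (chunks : List (List Char)) (buff : List Char) (w : Int),
    finishB (l.foldl (stepB cs) (chunks, buff, w)) = chunks ++ cont cs w buff l := by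
  induction l with
  | nil => intro chunks buff w; simp [finishB, cont]; split <;> simp
  | cons c rest ih =>
    intro chunks buff w
    simp only [List.foldl_cons, stepB]
    by_cases h : cs ≤ w + (if c = '\t' then (3 : Int) else 1)
    · rw [if_pos h, ih, cont, if_pos (show cs ≤ w + chrweightA c by simpa [chrweightA] using h)]
      simp [chrweightA]
    · rw [if_neg h, ih, cont, if_neg (show ¬ cs ≤ w + chrweightA c by simpa [chrweightA] using h)]
      simp [chrweightA]

-- ===== VERDICT (by name: the statement is the Claim_ definition above) =====
theorem chunk_str_by_weight_spec : Claim_equal_chunk_str_by_weight := by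
  intro string chunk_size _hdom hpre
  unfold Spec_chunk_str_by_weight chunk_str_by_weight chunk_str_by_weight_alt
  have hpre' : ∀ c ∈ string.toList, chrweightA c < chunk_size := by
    intro c hc
    have := (List.all_eq_true.mp hpre) c hc
    simpa [chrweightA] using this
  rw [outerA_cont string.toList chunk_size hpre' (string.toList.length + 1) 0 []
      (Nat.zero_le _) (by omega)]
  rw [foldl_stepB_cont chunk_size string.toList [] [] 0]
  simp
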